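-- pv_equiv track=rewrite | github.com/sokolovdp/finmars-core | poms/expressions_engine/functions.py | _if_valid_isin
-- ===== SOURCE A (Python) =====
-- def _if_valid_isin(evaluator, isin: str) -> bool:
--     isin = isin.upper().replace("-", "")
--
--     if len(isin) != 12:
--         return False
--     if not isin.isalnum():
--         return False
--
--     if not isin[-1].isdigit():
--         return False
--
--     if not isin[:2].isalpha():
--         return False
--
--     converted_digits = [
--         str(ord(char) - 55) if char.isalpha() else char for char in isin[:-1]
--     ]
--     converted_digits_str = "".join(converted_digits)
--     converted_digits_str_multiplied = [
--         int(char) * 2 if i % 2 == 0 else char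
--         for i, char in enumerate(converted_digits_str[::-1])
--     ][::-1]
--     summed_digits = sum(
--         int(digit) for char in converted_digits_str_multiplied for digit in str(char)
--     )
--     checksum = (10 - (summed_digits % 10)) % 10
--
--     if isin[-1] != str(checksum):
--         return False
--
--     return True
-- ===== SOURCE B (Python) =====
-- def _if_valid_isin(evaluator, isin: str) -> bool:
--     s = isin.upper().replace("-", "")
--     if len(s) != 12:
--         return False
--     if not (s.isalnum() and s[-1].isdigit() and s[:2].isalpha()):
--         return False
--
--     # One right-to-left pass over ALL 12 characters (check digit included): a tiny
--     # state machine with a 'double next digit' flag.  A letter contributes the two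
--     # digits of ord(c)-55 (parity flag unchanged), a digit one digit (flag flips).
--     # The code is valid iff the grand Luhn total is divisible by 10 -- equivalent
--     # to A's "check digit == computed checksum" comparison.
--     total, dbl = 0, False
--     for c in reversed(s):
--         if c.isdigit():
--             d = ord(c) - 48
--             if dbl:
--                 d = 2 * d - 9 if d > 4 else 2 * d
--             total += d
--             dbl = not dbl
--         else:
--             v = ord(c) - 55
--             lo, hi = v % 10, v // 10
--             if dbl:
--                 total += (2 * lo - 9 if lo > 4 else 2 * lo) + hi
--             else:
--                 total += lo + (2 * hi - 9 if hi > 4 else 2 * hi)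
--     return total % 10 == 0
-- ===== Notes on version B (the rewrite author's own statement) =====
-- stated objective: alternative
-- what changed: Replaces A's staged pipeline (expand to a digit string, reverse, double every other entry into a mixed int/str list, reverse again, digit-sum, compute a checksum and compare it to the check digit) by one right-to-left pass over all 12 characters with a 'double next digit' parity flag, never materialising the expanded digit list, and tests validity as Luhn total % 10 == 0 with the check digit included in the sum.
import Mathlib
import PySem

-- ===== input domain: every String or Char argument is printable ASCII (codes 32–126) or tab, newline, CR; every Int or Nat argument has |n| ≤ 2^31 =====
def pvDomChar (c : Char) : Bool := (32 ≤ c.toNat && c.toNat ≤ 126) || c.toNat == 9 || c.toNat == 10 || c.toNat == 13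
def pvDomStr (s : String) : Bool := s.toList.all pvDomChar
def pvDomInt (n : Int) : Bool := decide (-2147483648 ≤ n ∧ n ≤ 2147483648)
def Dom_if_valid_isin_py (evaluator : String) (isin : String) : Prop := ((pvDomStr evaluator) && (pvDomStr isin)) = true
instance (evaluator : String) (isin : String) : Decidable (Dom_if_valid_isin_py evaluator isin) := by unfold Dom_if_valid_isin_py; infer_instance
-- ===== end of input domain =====

-- B replaces A's staged pipeline (expanded digit string, two reversals, mixed int/str
-- doubling list, digit-sum, checksum comparison) by one right-to-left character pass
-- with a parity flag and a Luhn mod-10 divisibility test; objective: alternative.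

-- ===== PORT A =====
-- str(ord(char) - 55) if char.isalpha() else char
def aExpand (c : Char) : List Char :=
  if PySem.Chars.isalpha c then PySem.Int.toChars ((c.toNat : Int) - 55) else [c]

-- int(char) * 2 if i % 2 == 0 else char   (heterogeneous int/str element as a Sum)
def aMulItem (p : Int × Char) : Sum Int Char :=
  if PySem.Int.mod p.1 2 == 0 then Sum.inl ((PySem.Int.ofChars? [p.2]).getD 0 * 2)
  else Sum.inr p.2

-- str(char) for an element of the mixed int/str list
def aItemChars (x : Sum Int Char) : List Char :=
  match x with
  | .inl n => PySem.Int.toChars n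
  | .inr c => [c]

-- the checksum A computes from the cleaned 12-character string cs
def aChecksum (cs : List Char) : Int :=
  let converted : List (List Char) := (PySem.List.slice cs none (some (-1))).map aExpand
  let convertedStr : List Char := PySem.Chars.join [] converted
  let multiplied0 : List (Sum Int Char) :=
    (PySem.List.enumerate ((PySem.List.slice? convertedStr none none (-1)).getD [])).map aMulItem
  let multiplied : List (Sum Int Char) := (PySem.List.slice? multiplied0 none none (-1)).getD []
  let summed : Int :=
    (multiplied.flatMap (fun x => (aItemChars x).map (fun d => (PySem.Int.ofChars? [d]).getD 0))).sum
  PySem.Int.mod (10 - PySem.Int.mod summed 10) 10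

def if_valid_isin_py (evaluator : String) (isin : String) : Bool :=
  let cs := (PySem.Str.replace (PySem.Str.upper isin) "-" "").toList
  if cs.length ≠ 12 then false
  else if ¬ PySem.Chars.strIsalnum cs then false
  else
    match PySem.List.pyGet? cs (-1) with
    | none => false   -- unreachable: the length is 12
    | some last =>
      if ¬ PySem.Chars.isdigit last then false
      else if ¬ PySem.Chars.strIsalpha (PySem.List.slice cs none (some 2)) then false
      else if [last] ≠ PySem.Int.toChars (aChecksum cs) then false
      else true

-- ===== PORT B =====
-- the loop body of B: one character from the right, state (total, dbl)
def bLoop (st : Int × Bool) (c : Char) : Int × Bool :=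
  if PySem.Chars.isdigit c then
    let d : Int := (c.toNat : Int) - 48
    (st.1 + (if st.2 then (if d > 4 then 2 * d - 9 else 2 * d) else d), !st.2)
  else
    let v : Int := (c.toNat : Int) - 55
    let lo : Int := PySem.Int.mod v 10
    let hi : Int := PySem.Int.floordiv v 10
    (st.1 + (if st.2 then (if lo > 4 then 2 * lo - 9 else 2 * lo) + hi
             else lo + (if hi > 4 then 2 * hi - 9 else 2 * hi)), st.2)

def if_valid_isin_py_alt (evaluator : String) (isin : String) : Bool :=
  let cs := (PySem.Str.replace (PySem.Str.upper isin) "-" "").toList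
  if cs.length ≠ 12 then false
  else
    match PySem.List.pyGet? cs (-1) with   -- s[-1]; unreachable none: the length is 12
    | none => false
    | some last =>
      if ¬ (PySem.Chars.strIsalnum cs && PySem.Chars.isdigit last
            && PySem.Chars.strIsalpha (PySem.List.slice cs none (some 2))) then false
      else
        -- for c in reversed(s): total, dbl updated by bLoop
        PySem.Int.mod (cs.reverse.foldl bLoop (0, false)).1 10 == 0

-- ===== PRECONDITION & SPEC =====
def Spec_if_valid_isin_py (evaluator : String) (isin : String) (out : Bool) : Prop := out = if_valid_isin_py_alt evaluator isin
instance (evaluator : String) (isin : String) (out : Bool) : Decidable (Spec_if_valid_isin_py evaluator isin out) := by unfold Spec_if_valid_isin_py; infer_instance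

-- ===== CLAIM (what is proved, stated in full; the proofs are below) =====
def Claim_equal_if_valid_isin_py : Prop := ∀ (evaluator : String) (isin : String), Dom_if_valid_isin_py evaluator isin → Spec_if_valid_isin_py evaluator isin (if_valid_isin_py evaluator isin)

-- ===== LEMMAS AND PROOFS =====

-- proof-side helpers: the expanded Luhn digits of one character, the indexed Luhn step,
-- and the indexed Luhn sum over the expanded digits of cs[:-1] (reference semantics of A)
def expandD (c : Char) : List Int :=
  if PySem.Chars.isalpha c then
    [PySem.Int.floordiv ((c.toNat : Int) - 55) 10, PySem.Int.mod ((c.toNat : Int) - 55) 10]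
  else [(c.toNat : Int) - 48]

def stepE (p : Int × Int) : Int :=
  if PySem.Int.mod p.1 2 == 0 then (if 2 * p.2 > 9 then 2 * p.2 - 9 else 2 * p.2)
  else p.2

def luhnS (cs : List Char) : Int :=
  (PySem.List.enumerate (cs.dropLast.flatMap expandD).reverse 0).foldl (fun t p => t + stepE p) 0

def dChar (d : Int) : Char := Char.ofNat (d.toNat + 48)

def charVal (d : Char) : Int := (PySem.Int.ofChars? [d]).getD 0

def itemVal (x : Sum Int Char) : List Int := (aItemChars x).map charVal

lemma isalpha_bounds (c : Char) (ha : PySem.Chars.isalpha c = true) :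
    65 ≤ c.toNat ∧ c.toNat ≤ 90 ∨ 97 ≤ c.toNat ∧ c.toNat ≤ 122 := by
  simp [PySem.Chars.isalpha, PySem.Chars.isupper, PySem.Chars.islower, Char.le_def,
    UInt32.le_iff_toNat_le] at ha
  simp only [Char.toNat] at *
  omega

lemma isdigit_bounds (c : Char) (hd : PySem.Chars.isdigit c = true) :
    48 ≤ c.toNat ∧ c.toNat ≤ 57 := by
  simp [PySem.Chars.isdigit, Char.le_def, UInt32.le_iff_toNat_le] at hd
  simp only [Char.toNat] at *
  omega

lemma not_isdigit_of_isalpha (c : Char) (ha : PySem.Chars.isalpha c = true) :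
    PySem.Chars.isdigit c = false := by
  have hb := isalpha_bounds c ha
  by_contra h
  have hd := isdigit_bounds c (by revert h; cases PySem.Chars.isdigit c <;> simp)
  omega

-- toChars of a two-digit nonnegative value is its two digit characters
lemma toChars_two_digit (v : Int) (h10 : 10 ≤ v) (h67 : v ≤ 67) :
    PySem.Int.toChars v = [dChar (PySem.Int.floordiv v 10), dChar (PySem.Int.mod v 10)] := by
  interval_cases v <;> decide

lemma aExpand_eq (c : Char) (h : PySem.Chars.isalnum c = true) :
    aExpand c = (expandD c).map dChar := by
  by_cases ha : PySem.Chars.isalpha c = true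
  · have hb := isalpha_bounds c ha
    simp [aExpand, expandD, ha,
      toChars_two_digit ((c.toNat : Int) - 55) (by omega) (by omega)]
  · have hd : PySem.Chars.isdigit c = true := by
      simp [PySem.Chars.isalnum, ha] at h; exact h
    have hb := isdigit_bounds c hd
    have hval : ((c.toNat : Int) - 48).toNat + 48 = c.toNat := by omega
    have hc : Char.ofNat c.toNat = c := by
      apply Char.ext
      simp [Char.ofNat, Char.ofNatAux, Nat.isValidChar]
      rw [dif_pos (by omega)]
      apply UInt32.toNat_inj.mp
      simp
    simp [aExpand, expandD, ha, dChar, hval, hc]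

lemma expandD_bounds (c : Char) (h : PySem.Chars.isalnum c = true) :
    ∀ d ∈ expandD c, 0 ≤ d ∧ d ≤ 9 := by
  by_cases ha : PySem.Chars.isalpha c = true
  · have hb := isalpha_bounds c ha
    intro d hd
    simp [expandD, ha] at hd
    have hfd := (PySem.Int.floordiv_eq_iff_of_pos (a := (c.toNat : Int) - 55) (b := 10)
      (q := PySem.Int.floordiv ((c.toNat : Int) - 55) 10) (by omega)).mp rfl
    have hm0 := PySem.Int.mod_nonneg ((c.toNat : Int) - 55) (b := 10) (by omega)
    have hm9 := PySem.Int.mod_lt ((c.toNat : Int) - 55) (b := 10) (by omega)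
    rcases hd with h | h <;> subst h <;> constructor <;> omega
  · have hd : PySem.Chars.isdigit c = true := by
      simp [PySem.Chars.isalnum, ha] at h; exact h
    have hb := isdigit_bounds c hd
    intro d hdm
    simp [expandD, ha] at hdm
    subst hdm
    constructor <;> omega

-- per-element agreement: A's digit-sum of the (possibly doubled) entry is the indexed Luhn step
lemma elem_eq (s d : Int) (h0 : 0 ≤ d) (h9 : d ≤ 9) :
    (itemVal (aMulItem (s, dChar d))).sum = stepE (s, d) := by
  by_cases hm : PySem.Int.mod s 2 == 0
  · simp only [itemVal, aMulItem, stepE, hm, if_pos]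
    interval_cases d <;> decide
  · simp only [itemVal, aMulItem, stepE, hm, Bool.false_eq_true, if_neg, not_false_iff]
    interval_cases d <;> decide

-- the indexed digit-sum over A's expanded digit characters equals the indexed Luhn fold
lemma sum_eq (l : List Int) (hb : ∀ d ∈ l, 0 ≤ d ∧ d ≤ 9) (s t : Int) :
    t + (((PySem.List.enumerate (l.map dChar) s).map aMulItem).flatMap itemVal).sum
      = (PySem.List.enumerate l s).foldl (fun t p => t + stepE p) t := by
  induction l generalizing s t with
  | nil => simp [PySem.List.enumerate_nil]
  | cons d l ih =>
    have hd := hb d (by simp)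
    simp only [List.map_cons, PySem.List.enumerate_cons, List.map_cons, List.flatMap_cons,
      List.foldl_cons, List.sum_append]
    rw [← ih (fun x hx => hb x (by simp [hx])) (s + 1) (t + stepE (s, d))]
    have := elem_eq s d hd.1 hd.2
    omega

lemma join_nil_eq_flatten (l : List (List Char)) : PySem.Chars.join [] l = l.flatten := by
  induction l with
  | nil => rfl
  | cons x l ih =>
    cases l with
    | nil => simp [PySem.Chars.join, List.intercalate]
    | cons y t =>
      simp only [PySem.Chars.join, List.intercalate, List.intersperse, List.flatten_cons] at *
      simp [ih]

lemma flatten_expand (l : List Char) (h : ∀ c ∈ l, PySem.Chars.isalnum c = true) :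
    (l.map aExpand).flatten = (l.flatMap expandD).map dChar := by
  induction l with
  | nil => rfl
  | cons c l ih =>
    simp only [List.map_cons, List.flatten_cons, List.flatMap_cons, List.map_append]
    rw [aExpand_eq c (h c (by simp)), ih (fun x hx => h x (by simp [hx]))]

lemma sum_flatMap_reverse {α : Type} (M : List α) (f : α → List Int) :
    (M.reverse.flatMap f).sum = (M.flatMap f).sum := by
  induction M with
  | nil => rfl
  | cons x M ih =>
    simp only [List.reverse_cons, List.flatMap_append, List.flatMap_cons, List.sum_append,
      List.flatMap_nil, List.append_nil, ih]
    omega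

-- A's checksum is the indexed-Luhn checksum of cs[:-1]
lemma checksum_eq (cs : List Char) (hall : ∀ c ∈ cs.dropLast, PySem.Chars.isalnum c = true) :
    aChecksum cs = PySem.Int.mod (10 - PySem.Int.mod (luhnS cs) 10) 10 := by
  unfold aChecksum luhnS
  dsimp only
  rw [PySem.List.slice_to_neg_one,
    PySem.List.slice?_none_none_neg_one, PySem.List.slice?_none_none_neg_one]
  simp only [Option.getD_some]
  rw [join_nil_eq_flatten, flatten_expand cs.dropLast hall]
  rw [show ((cs.dropLast.flatMap expandD).map dChar).reverse
        = (cs.dropLast.flatMap expandD).reverse.map dChar from (List.map_reverse).symm]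
  rw [show (fun x => List.map (fun d => (PySem.Int.ofChars? [d]).getD 0) (aItemChars x)) = itemVal
        from rfl]
  rw [sum_flatMap_reverse]
  have hbnd : ∀ d ∈ (cs.dropLast.flatMap expandD).reverse, 0 ≤ d ∧ d ≤ 9 := by
    intro d hd
    rw [List.mem_reverse] at hd
    simp only [List.mem_flatMap] at hd
    obtain ⟨c, hc, hdc⟩ := hd
    exact expandD_bounds c (hall c hc) d hdc
  rw [← sum_eq (cs.dropLast.flatMap expandD).reverse hbnd 0 0]
  simp

-- parity bookkeeping
lemma mod_two_flip (s : Int) : (PySem.Int.mod (s + 1) 2 == 0) = !(PySem.Int.mod s 2 == 0) := by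
  rw [PySem.Int.mod_eq_emod_of_pos (by norm_num), PySem.Int.mod_eq_emod_of_pos (by norm_num)]
  have h1 : (s + 1) % 2 = 1 - s % 2 := by omega
  rcases Int.emod_two_eq s with h | h <;> simp [h1, h]

lemma mod_two_shift2 (s : Int) : PySem.Int.mod (s + 2) 2 = PySem.Int.mod s 2 := by
  rw [PySem.Int.mod_eq_emod_of_pos (by norm_num), PySem.Int.mod_eq_emod_of_pos (by norm_num)]
  omega

-- one automaton step = the indexed Luhn steps of that character's expanded digits
lemma step_char (c : Char) (h : PySem.Chars.isalnum c = true) (t s : Int) :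
    bLoop (t, (PySem.Int.mod s 2 == 0)) c
      = (t + (PySem.List.enumerate (expandD c).reverse s).foldl (fun u p => u + stepE p) 0,
         (PySem.Int.mod (s + ((expandD c).length : Int)) 2 == 0)) := by
  by_cases ha : PySem.Chars.isalpha c = true
  · have hd := not_isdigit_of_isalpha c ha
    simp only [bLoop, expandD, ha, if_pos, hd, Bool.false_eq_true, if_neg, not_false_iff,
      List.reverse_cons, List.reverse_nil, List.nil_append, List.cons_append,
      PySem.List.enumerate_cons, PySem.List.enumerate_nil, List.foldl_cons, List.foldl_nil,
      List.length_cons, List.length_nil]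
    rw [Prod.mk.injEq]
    refine ⟨?_, ?_⟩
    · unfold stepE
      rw [mod_two_flip s]
      by_cases hm : (PySem.Int.mod s 2 == 0) = true <;>
        simp only [hm, Bool.not_true, Bool.not_false, if_pos, Bool.false_eq_true, if_neg,
          not_false_iff] <;>
        split_ifs <;> omega
    · push_cast
      rw [mod_two_shift2]
  · have hd : PySem.Chars.isdigit c = true := by
      simp [PySem.Chars.isalnum, ha] at h; exact h
    simp only [bLoop, expandD, ha, Bool.false_eq_true, if_neg, not_false_iff, hd, if_pos,
      List.reverse_cons, List.reverse_nil, List.nil_append,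
      PySem.List.enumerate_cons, PySem.List.enumerate_nil, List.foldl_cons, List.foldl_nil,
      List.length_cons, List.length_nil]
    rw [Prod.mk.injEq]
    refine ⟨?_, ?_⟩
    · unfold stepE
      by_cases hm : (PySem.Int.mod s 2 == 0) = true <;>
        simp only [hm, if_pos, Bool.false_eq_true, if_neg, not_false_iff] <;>
        (try split_ifs) <;> omega
    · push_cast
      rw [mod_two_flip s]

-- the automaton over a reversed suffix = the indexed Luhn fold over its expanded digits
lemma auto_eq (m : List Char) (h : ∀ c ∈ m, PySem.Chars.isalnum c = true) (t s : Int) :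
    (m.foldl bLoop (t, (PySem.Int.mod s 2 == 0))).1
      = (PySem.List.enumerate (m.flatMap (fun c => (expandD c).reverse)) s).foldl
          (fun u p => u + stepE p) t := by
  induction m generalizing t s with
  | nil => simp [PySem.List.enumerate_nil]
  | cons c m ih =>
    simp only [List.foldl_cons, List.flatMap_cons, PySem.List.enumerate_append,
      List.foldl_append]
    rw [step_char c (h c (by simp)) t s, List.length_reverse]
    rw [ih (fun x hx => h x (by simp [hx]))]
    simp only [PySem.List.foldl_add]
    omega

lemma char_toNat_ofNat (n : Nat) (h : n < 55296) : (Char.ofNat n).toNat = n := by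
  simp [Char.ofNat, Nat.isValidChar]
  rw [dif_pos (Or.inl h)]
  simp [Char.ofNatAux, Char.toNat]

lemma char_ofNat_toNat (c : Char) (h : c.toNat < 55296) : Char.ofNat c.toNat = c := by
  apply Char.ext
  simp [Char.ofNat, Char.ofNatAux, Nat.isValidChar]
  rw [dif_pos (by omega)]
  apply UInt32.toNat_inj.mp
  simp

lemma toChars_one_digit (C : Int) (h0 : 0 ≤ C) (h9 : C < 10) :
    PySem.Int.toChars C = [Char.ofNat (C.toNat + 48)] := by
  interval_cases C <;> decide

-- "check digit equals the computed checksum" is "grand Luhn total divisible by 10"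
lemma final_iff (last : Char) (hd : PySem.Chars.isdigit last = true) (S : Int) :
    ((if [last] ≠ PySem.Int.toChars (PySem.Int.mod (10 - PySem.Int.mod S 10) 10) then false
      else true) : Bool)
      = (PySem.Int.mod ((last.toNat : Int) - 48 + S) 10 == 0) := by
  have hb := isdigit_bounds last hd
  set C := PySem.Int.mod (10 - PySem.Int.mod S 10) 10 with hC
  have hC0 : 0 ≤ C := PySem.Int.mod_nonneg _ (by norm_num)
  have hC10 : C < 10 := PySem.Int.mod_lt _ (by norm_num)
  have htc := toChars_one_digit C hC0 hC10
  have hiff : [last] = PySem.Int.toChars C ↔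
      PySem.Int.mod ((last.toNat : Int) - 48 + S) 10 = 0 := by
    rw [htc]
    have hcast : (C.toNat : Int) = C := Int.toNat_of_nonneg hC0
    constructor
    · intro h
      have h' : last = Char.ofNat (C.toNat + 48) := by simpa using h
      have : last.toNat = C.toNat + 48 := by
        rw [h', char_toNat_ofNat _ (by omega)]
      rw [PySem.Int.mod_eq_emod_of_pos (by norm_num)] at hC ⊢
      rw [PySem.Int.mod_eq_emod_of_pos (by norm_num)] at hC
      omega
    · intro h
      have hlastN : last.toNat = C.toNat + 48 := by
        rw [PySem.Int.mod_eq_emod_of_pos (by norm_num)] at hC h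
        rw [PySem.Int.mod_eq_emod_of_pos (by norm_num)] at hC
        omega
      have : last = Char.ofNat (C.toNat + 48) := by
        rw [← hlastN, char_ofNat_toNat last (by omega)]
      simp [this]
  by_cases h : [last] = PySem.Int.toChars C
  · simp only [h, ne_eq, not_true_eq_false, if_neg, not_false_iff]
    exact ((beq_iff_eq).mpr (hiff.mp h)).symm
  · simp only [ne_eq, h, not_false_iff, if_pos]
    exact (beq_eq_false_iff_ne.mpr ((not_congr hiff).mp h)).symm

set_option maxHeartbeats 1000000 in
theorem if_valid_isin_py_spec_aux (evaluator isin : String) :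
    if_valid_isin_py evaluator isin = if_valid_isin_py_alt evaluator isin := by
  unfold if_valid_isin_py if_valid_isin_py_alt
  set cs := (PySem.Str.replace (PySem.Str.upper isin) "-" "").toList with hcs
  by_cases h12 : cs.length ≠ 12
  · simp [h12]
  rw [not_not] at h12
  rw [if_neg (not_not_intro h12), if_neg (not_not_intro h12)]
  have hne : cs ≠ [] := by intro hn; rw [hn] at h12; simp at h12
  have hget : PySem.List.pyGet? cs (-1) = some (cs.getLast hne) := by
    have h11 : 11 < cs.length := by omega
    rw [List.getLast_eq_getElem]
    simp [PySem.List.pyGet?, h12, show PySem.List.pyIdx? 12 (-1) = some 11 from rfl]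
  rw [hget]
  set last := cs.getLast hne with hlast
  by_cases haln : PySem.Chars.strIsalnum cs = true
  swap
  · simp [haln]
  by_cases hdig : PySem.Chars.isdigit last = true
  swap
  · simp [haln, hdig]
  by_cases halp : PySem.Chars.strIsalpha (PySem.List.slice cs none (some 2)) = true
  swap
  · simp [haln, hdig, halp]
  simp only [haln, hdig, halp, Bool.and_self, not_true_eq_false, if_false]
  have hall : ∀ c ∈ cs.dropLast, PySem.Chars.isalnum c = true := by
    intro c hc
    have hmem : c ∈ cs := List.mem_of_mem_dropLast hc
    simp [PySem.Chars.strIsalnum, List.all_eq_true] at haln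
    exact haln.2 c hmem
  have hrev : cs.reverse = last :: cs.dropLast.reverse := by
    conv_lhs => rw [← List.dropLast_append_getLast hne]
    rw [List.reverse_append]
    simp [← hlast]
  have hb0 : bLoop (0, false) last = ((last.toNat : Int) - 48, (PySem.Int.mod 0 2 == 0)) := by
    simp only [bLoop, hdig, if_pos, Bool.false_eq_true, if_neg, not_false_iff, Bool.not_false]
    rw [Prod.mk.injEq]
    refine ⟨by ring, by decide⟩
  have halldrop : ∀ c ∈ cs.dropLast.reverse, PySem.Chars.isalnum c = true := by
    intro c hc; exact hall c (List.mem_reverse.mp hc)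
  have htot : (cs.reverse.foldl bLoop (0, false)).1 = ((last.toNat : Int) - 48) + luhnS cs := by
    rw [hrev, List.foldl_cons, hb0,
      auto_eq cs.dropLast.reverse halldrop ((last.toNat : Int) - 48) 0]
    rw [show (fun c => (expandD c).reverse) = (List.reverse ∘ expandD) from rfl,
      ← List.reverse_flatMap]
    unfold luhnS
    rw [PySem.List.foldl_add, PySem.List.foldl_add]
    ring
  rw [htot, checksum_eq cs hall]
  exact final_iff last hdig (luhnS cs)

-- ===== VERDICT (by name: the statement is the Claim_ definition above) =====
theorem if_valid_isin_py_spec : Claim_equal_if_valid_isin_py := by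
  intro evaluator isin _
  exact if_valid_isin_py_spec_aux evaluator isin
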